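-- pv_equiv track=rewrite | github.com/thilinatnt/aoc-2022 | day25.py | get_snafu
-- ===== SOURCE A (Python) =====
-- def get_snafu(number: int, snafu: list) -> list[str]:
--     total = 0
--     y = 0
--     x = -1
--     while total < number:
--         x += 1
--         total += 5 ** x
--         if total >= number:
--             y = 1
--         else:
--             total += 5 ** x
--             y = 2
--
--     snafu.append(str(y))
--     snafu = get_snafu1(x - 1, (5 ** x) * y - number, snafu)
--     return snafu
--
-- def get_snafu1(x: int, remainder: int, snafu: list) -> list[str]:
--     if x < 0:
--         return snafu
--
--     y = -2
--     y_char = '='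
--     min_gap = abs((5 ** x) * -2 + remainder)
--
--     if abs((5 ** x) * -1 + remainder) < min_gap:
--         min_gap = abs((5 ** x) * -1 + remainder)
--         y = -1
--         y_char = '-'
--
--     if abs((5 ** x) * 0 + remainder) < min_gap:
--         min_gap = abs((5 ** x) * 0 + remainder)
--         y = 0
--         y_char = '0'
--
--     if abs((5 ** x) * 1 + remainder) < min_gap:
--         min_gap = abs((5 ** x) * 1 + remainder)
--         y = 1
--         y_char = '1'
--
--     if abs((5 ** x) * 2 + remainder) < min_gap:
--         min_gap = abs((5 ** x) * 2 + remainder)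
--         y = 2
--         y_char = '2'
--
--     snafu.append(y_char)
--     snafu = get_snafu1(x - 1, remainder + (5 ** x) * y, snafu)
--     return snafu
-- ===== SOURCE B (Python) =====
-- def get_snafu(number: int, snafu: list) -> list[str]:
--     # Single-pass balanced base-5: take n % 5 shifted into [-2, 2], emit digit, carry.
--     digits = []
--     n = number
--     while n > 0:
--         r = (n + 2) % 5 - 2
--         digits.append(snafu_char(r))
--         n = (n - r) // 5
--     if not digits:
--         digits.append('0')
--     snafu.extend(reversed(digits))
--     return snafu
--
-- def snafu_char(r: int) -> str:
--     if r == -2: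
--         return '='
--     elif r == -1:
--         return '-'
--     elif r == 0:
--         return '0'
--     elif r == 1:
--         return '1'
--     else:
--         return '2'
-- ===== Notes on version B (the rewrite author's own statement) =====
-- stated objective: simpler
-- what changed: A searches the leading digit with a while-loop over powers of 5 and then picks each lower digit most-significant-first by minimizing |5**x*d + remainder| over all five candidate digits; B emits digits least-significant-first in one short pass via n%5 shifted into [-2,2] with a carry, then reverses.
import Mathlib
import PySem

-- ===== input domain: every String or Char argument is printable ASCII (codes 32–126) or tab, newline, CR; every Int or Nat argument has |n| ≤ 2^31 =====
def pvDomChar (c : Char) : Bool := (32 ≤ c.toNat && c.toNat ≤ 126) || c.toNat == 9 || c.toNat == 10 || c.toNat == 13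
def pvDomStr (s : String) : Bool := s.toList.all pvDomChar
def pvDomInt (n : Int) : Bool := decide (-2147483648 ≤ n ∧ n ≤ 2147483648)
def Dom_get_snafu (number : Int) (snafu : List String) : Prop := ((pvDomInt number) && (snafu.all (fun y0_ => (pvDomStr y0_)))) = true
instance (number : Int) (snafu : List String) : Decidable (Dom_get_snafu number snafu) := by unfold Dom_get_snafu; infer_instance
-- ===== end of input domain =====

-- B replaces A's most-significant-first greedy search (recomputing 5**x powers) by a single
-- least-significant-first balanced-base-5 digit loop; return values proved equal (both, like A,
-- append to the passed list; equivalence here is about the returned list value).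


-- ===== PORT A =====
-- the while-loop of get_snafu: state (total, y, x), returns the final state.
-- x ≥ 0 whenever 5 ** x is evaluated inside the loop, so 5 ^ x.toNat is exact there.
def getSnafuLoop (number total y x : Int) : Int × Int × Int :=
  if h : total < number then
    let x' := x + 1
    let t1 := total + 5 ^ x'.toNat
    let ty : Int × Int := if number ≤ t1 then (t1, 1) else (t1 + 5 ^ x'.toNat, 2)
    getSnafuLoop number ty.1 ty.2 x'
  else (total, y, x)
termination_by (number - total).toNat
decreasing_by
  have h5 : (0:Int) < 5 ^ (x + 1).toNat := pow_pos (by norm_num) _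
  split <;> simp <;> omega

-- the min_gap selection chain of get_snafu1: returns (y, y_char, min_gap)
def chooseDigit (p r : Int) : Int × String × Int :=
  let s0 : Int × String × Int := (-2, "=", ((p * (-2) + r).natAbs : Int))
  let s1 := if ((p * (-1) + r).natAbs : Int) < s0.2.2 then ((-1 : Int), "-", ((p * (-1) + r).natAbs : Int)) else s0
  let s2 := if ((p * 0 + r).natAbs : Int) < s1.2.2 then ((0 : Int), "0", ((p * 0 + r).natAbs : Int)) else s1
  let s3 := if ((p * 1 + r).natAbs : Int) < s2.2.2 then ((1 : Int), "1", ((p * 1 + r).natAbs : Int)) else s2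
  let s4 := if ((p * 2 + r).natAbs : Int) < s3.2.2 then ((2 : Int), "2", ((p * 2 + r).natAbs : Int)) else s3
  s4

def get_snafu1 (x remainder : Int) (snafu : List String) : List String :=
  if x < 0 then snafu
  else
    let c := chooseDigit (5 ^ x.toNat) remainder
    get_snafu1 (x - 1) (remainder + 5 ^ x.toNat * c.1) (snafu ++ [c.2.1])
termination_by (x + 1).toNat
decreasing_by omega

def get_snafu (number : Int) (snafu : List String) : List String :=
  let r := getSnafuLoop number 0 0 (-1)
  let y := r.2.1
  let x := r.2.2
  -- when number ≤ 0 Python computes (5 ** -1) * 0 - number here (a float); it is multiplied by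
  -- y = 0 resp. discarded unread by get_snafu1 (x - 1 < 0), exactly as this port's Int value is
  get_snafu1 (x - 1) (5 ^ x.toNat * y - number) (snafu ++ [PySem.Int.toStr y])

-- ===== PORT B =====
def snafuChar (r : Int) : String :=
  if r = -2 then "=" else if r = -1 then "-" else if r = 0 then "0" else if r = 1 then "1" else "2"

-- the while-loop of Source B's get_snafu: digits of number, least significant first
def snafuDigitsLE (n : Int) : List String :=
  if h : 0 < n then
    snafuChar (PySem.Int.mod (n + 2) 5 - 2)
      :: snafuDigitsLE (PySem.Int.floordiv (n - (PySem.Int.mod (n + 2) 5 - 2)) 5)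
  else []
termination_by n.toNat
decreasing_by
  have h1 : 0 ≤ PySem.Int.mod (n + 2) 5 := PySem.Int.mod_nonneg _ (by norm_num)
  have h2 : PySem.Int.mod (n + 2) 5 < 5 := PySem.Int.mod_lt _ (by norm_num)
  have h3 : PySem.Int.floordiv (n - (PySem.Int.mod (n + 2) 5 - 2)) 5 < n := by
    rw [PySem.Int.floordiv_lt_iff_lt_mul (by norm_num)]; omega
  omega

def get_snafu_alt (number : Int) (snafu : List String) : List String :=
  let digits := snafuDigitsLE number
  let digits := if digits = [] then ["0"] else digits
  snafu ++ digits.reverse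

-- ===== PRECONDITION & SPEC =====
def Spec_get_snafu (number : Int) (snafu : List String) (out : List String) : Prop := out = get_snafu_alt number snafu
instance (number : Int) (snafu : List String) (out : List String) : Decidable (Spec_get_snafu number snafu out) := by unfold Spec_get_snafu; infer_instance

-- ===== CLAIM (what is proved, stated in full; the proofs are below) =====
def Claim_equal_get_snafu : Prop := ∀ (number : Int) (snafu : List String), Dom_get_snafu number snafu → Spec_get_snafu number snafu (get_snafu number snafu)

-- ===== LEMMAS AND PROOFS =====

def dval (s : String) : Int :=
  if s = "=" then -2 else if s = "-" then -1 else if s = "0" then 0 else if s = "1" then 1 else 2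

def goodDigits (ds : List String) : Prop :=
  ∀ s ∈ ds, s = "=" ∨ s = "-" ∨ s = "0" ∨ s = "1" ∨ s = "2"

def valBE (ds : List String) : Int := ds.foldl (fun a s => 5 * a + dval s) 0


lemma valBE_from (ds : List String) (a : Int) :
    ds.foldl (fun a s => 5 * a + dval s) a = a * 5 ^ ds.length + valBE ds := by
  induction ds generalizing a with
  | nil => simp [valBE]
  | cons s ds ih =>
      simp only [List.foldl_cons, List.length_cons, valBE] at *
      rw [ih (5 * a + dval s), ih (5 * 0 + dval s)]
      ring

lemma valBE_cons (s : String) (ds : List String) :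
    valBE (s :: ds) = dval s * 5 ^ ds.length + valBE ds := by
  have h : valBE (s :: ds) = List.foldl (fun a s => 5 * a + dval s) (5 * 0 + dval s) ds := by
    simp [valBE]
  rw [h, valBE_from ds (5 * 0 + dval s)]
  ring

lemma valBE_append_singleton (ds : List String) (s : String) :
    valBE (ds ++ [s]) = 5 * valBE ds + dval s := by
  simp [valBE, List.foldl_append]

lemma dval_bound_of_good {ds : List String} (h : goodDigits ds) :
    ∀ s ∈ ds, -2 ≤ dval s ∧ dval s ≤ 2 := by
  intro s hs
  rcases h s hs with rfl | rfl | rfl | rfl | rfl <;> exact (by decide)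

lemma valBE_bound (ds : List String) (h : ∀ s ∈ ds, -2 ≤ dval s ∧ dval s ≤ 2) :
    -(5 ^ ds.length - 1) ≤ 2 * valBE ds ∧ 2 * valBE ds ≤ 5 ^ ds.length - 1 := by
  induction ds with
  | nil => simp [valBE]
  | cons s ds ih =>
      have hs := h s (by simp)
      have hd := ih (fun t ht => h t (by simp [ht]))
      rw [valBE_cons]
      have hp : (0:Int) < 5 ^ ds.length := by positivity
      have h1 : -2 * 5 ^ ds.length ≤ dval s * 5 ^ ds.length :=
        mul_le_mul_of_nonneg_right hs.1 hp.le
      have h2 : dval s * 5 ^ ds.length ≤ 2 * 5 ^ ds.length :=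
        mul_le_mul_of_nonneg_right hs.2 hp.le
      rw [List.length_cons, pow_succ]
      constructor <;> linarith [hd.1, hd.2]

lemma dval_inj {s t : String}
    (hs : s = "=" ∨ s = "-" ∨ s = "0" ∨ s = "1" ∨ s = "2")
    (ht : t = "=" ∨ t = "-" ∨ t = "0" ∨ t = "1" ∨ t = "2")
    (h : dval s = dval t) : s = t := by
  rcases hs with rfl | rfl | rfl | rfl | rfl <;>
    rcases ht with rfl | rfl | rfl | rfl | rfl <;> revert h <;> decide

lemma uniqBE : ∀ (ds es : List String), goodDigits ds → goodDigits es →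
    ds.length = es.length → valBE ds = valBE es → ds = es := by
  intro ds
  induction ds with
  | nil => intro es _ _ hlen _; simpa using (List.length_eq_zero_iff.mp hlen.symm).symm
  | cons s ds ih =>
      intro es hgd hge hlen hval
      cases es with
      | nil => simp at hlen
      | cons t es =>
          simp only [List.length_cons, Nat.add_right_cancel_iff] at hlen
          rw [valBE_cons, valBE_cons, hlen] at hval
          have hbd := valBE_bound ds (dval_bound_of_good (fun u hu => hgd u (by simp [hu])))
          have hbe := valBE_bound es (dval_bound_of_good (fun u hu => hge u (by simp [hu])))
          rw [hlen] at hbd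
          have hp : (0:Int) < 5 ^ es.length := by positivity
          have hdeq : dval s = dval t := by
            rcases lt_trichotomy (dval s) (dval t) with hlt | heq | hgt
            · have := mul_le_mul_of_nonneg_right
                (show (1:Int) ≤ dval t - dval s by omega) hp.le
              nlinarith [hbd.1, hbd.2, hbe.1, hbe.2]
            · exact heq
            · have := mul_le_mul_of_nonneg_right
                (show (1:Int) ≤ dval s - dval t by omega) hp.le
              nlinarith [hbd.1, hbd.2, hbe.1, hbe.2]
          have hst : s = t := dval_inj (hgd s (by simp)) (hge t (by simp)) hdeq
          subst hst
          have hv2 : valBE ds = valBE es := by omega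
          rw [ih es (fun u hu => hgd u (by simp [hu])) (fun u hu => hge u (by simp [hu])) hlen hv2]

lemma pow5_pos (k : Nat) : (0:Int) < 5 ^ k := by positivity

lemma pow5_odd (k : Nat) : (5:Int) ^ k % 2 = 1 := by
  have h : Odd ((5:Int) ^ k) := Odd.pow ⟨2, by norm_num⟩
  exact Int.odd_iff.mp h

lemma pow5_shift (k : Nat) (h : 1 ≤ k) : (5:Int) ^ k = 5 ^ (k - 1) * 5 := by
  rw [← pow_succ]
  congr 1
  omega

lemma snafuChar_mem (r : Int) :
    snafuChar r = "=" ∨ snafuChar r = "-" ∨ snafuChar r = "0" ∨ snafuChar r = "1" ∨ snafuChar r = "2" := by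
  unfold snafuChar
  split_ifs <;> tauto

lemma dval_snafuChar (r : Int) (h1 : -2 ≤ r) (h2 : r ≤ 2) : dval (snafuChar r) = r := by
  interval_cases r <;> decide

set_option maxHeartbeats 2000000 in
lemma chooseDigit_spec (p r : Int) (hp : 1 ≤ p) (hodd : p % 2 = 1)
    (hr : 2 * (r.natAbs : Int) + 1 ≤ 5 * p) :
    ∃ (d : Int) (c : String), chooseDigit p r = (d, c, ((p * d + r).natAbs : Int)) ∧
      dval c = d ∧ (c = "=" ∨ c = "-" ∨ c = "0" ∨ c = "1" ∨ c = "2") ∧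
      2 * (((p * d + r).natAbs : Int)) + 1 ≤ p := by
  simp only [chooseDigit]
  split_ifs <;> (try dsimp only at *) <;>
    first
    | exact ⟨-2, "=", rfl, by decide, by tauto, by omega⟩
    | exact ⟨-1, "-", rfl, by decide, by tauto, by omega⟩
    | exact ⟨0, "0", rfl, by decide, by tauto, by omega⟩
    | exact ⟨1, "1", rfl, by decide, by tauto, by omega⟩
    | exact ⟨2, "2", rfl, by decide, by tauto, by omega⟩

lemma g1_spec : ∀ (n : Nat) (r : Int) (acc : List String),
    2 * (r.natAbs : Int) + 1 ≤ 5 ^ n →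
    ∃ ds, get_snafu1 ((n : Int) - 1) r acc = acc ++ ds ∧ ds.length = n ∧
      goodDigits ds ∧ valBE ds = -r := by
  intro n
  induction n with
  | zero =>
      intro r acc hr
      simp only [pow_zero] at hr
      refine ⟨[], ?_, rfl, by intro s hs; simp at hs, ?_⟩
      · rw [get_snafu1]
        simp
      · simp only [valBE, List.foldl_nil]
        omega
  | succ n ih =>
      intro r acc hr
      have hp1 : (1:Int) ≤ 5 ^ n := pow5_pos n
      obtain ⟨d, c, hcd, hdv, hcg, hb⟩ := chooseDigit_spec (5 ^ n) r hp1 (pow5_odd n)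
        (by rw [pow_succ] at hr; omega)
      have hx : ((n + 1 : Nat) : Int) - 1 = (n : Int) := by push_cast; ring
      rw [hx, get_snafu1, if_neg (by omega : ¬ ((n : Int) < 0))]
      simp only [Int.toNat_natCast, hcd]
      obtain ⟨ds', hds', hlen', hgood', hval'⟩ := ih (r + 5 ^ n * d) (acc ++ [c])
        (by rw [show r + 5 ^ n * d = 5 ^ n * d + r by ring]; omega)
      refine ⟨c :: ds', ?_, by simp [hlen'], ?_, ?_⟩
      · rw [hds']
        simp
      · intro s hs
        rcases List.mem_cons.mp hs with rfl | hs
        · exact hcg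
        · exact hgood' s hs
      · rw [valBE_cons, hlen', hdv, hval']
        ring

lemma digitsLE_spec : ∀ (f : Nat) (n : Int), n.toNat ≤ f → 0 < n →
    goodDigits (snafuDigitsLE n) ∧ 1 ≤ (snafuDigitsLE n).length ∧
      valBE (snafuDigitsLE n).reverse = n ∧
      (5:Int) ^ ((snafuDigitsLE n).length - 1) ≤ 2 * n ∧
      2 * n ≤ (5:Int) ^ (snafuDigitsLE n).length - 1 := by
  intro f
  induction f with
  | zero => intro n hf hn; omega
  | succ f ih =>
      intro n hf hn
      have hm1 : 0 ≤ PySem.Int.mod (n + 2) 5 := PySem.Int.mod_nonneg _ (by norm_num)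
      have hm2 : PySem.Int.mod (n + 2) 5 < 5 := PySem.Int.mod_lt _ (by norm_num)
      have hme : PySem.Int.mod (n + 2) 5 = (n + 2) % 5 := PySem.Int.mod_eq_emod_of_pos (by norm_num)
      set r : Int := PySem.Int.mod (n + 2) 5 - 2 with hrdef
      set n' : Int := PySem.Int.floordiv (n - r) 5 with hn'def
      have hfe : n' = (n - r) / 5 := PySem.Int.floordiv_eq_ediv_of_pos (by norm_num)
      have hrec : n = 5 * n' + r := by
        rw [hfe]
        omega
      have hr1 : -2 ≤ r := by omega
      have hr2 : r ≤ 2 := by omega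
      have hunf : snafuDigitsLE n = snafuChar r :: snafuDigitsLE n' := by
        rw [snafuDigitsLE, dif_pos hn]
      by_cases hz : 0 < n'
      · obtain ⟨hg', hl', hv', hlo', hhi'⟩ := ih n' (by omega) hz
        rw [hunf]
        set D' := snafuDigitsLE n' with hD'
        have hsh : (5:Int) ^ D'.length = 5 ^ (D'.length - 1) * 5 := pow5_shift _ hl'
        have hop := pow5_odd (D'.length - 1)
        have hpp := pow5_pos (D'.length - 1)
        have hpp2 := pow5_pos D'.length
        refine ⟨?_, by simp, ?_, ?_, ?_⟩
        · intro s hs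
          rcases List.mem_cons.mp hs with rfl | hs
          · exact snafuChar_mem r
          · exact hg' s hs
        · rw [List.reverse_cons, valBE_append_singleton, hv', dval_snafuChar r hr1 hr2]
          omega
        · simp only [List.length_cons, Nat.add_sub_cancel]
          omega
        · simp only [List.length_cons, pow_succ]
          omega
      · have hn'0 : n' = 0 := by omega
        have hnil : snafuDigitsLE n' = [] := by rw [snafuDigitsLE, dif_neg hz]
        rw [hunf, hnil]
        have hrn : r = n := by omega
        refine ⟨?_, by simp, ?_, ?_, ?_⟩
        · intro s hs
          rcases List.mem_cons.mp hs with rfl | hs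
          · exact snafuChar_mem r
          · simp at hs
        · have : valBE [snafuChar r] = valBE ([] ++ [snafuChar r]) := by simp
          rw [List.reverse_cons, List.reverse_nil, List.nil_append, this,
            valBE_append_singleton, dval_snafuChar r hr1 hr2]
          simp only [valBE, List.foldl_nil]
          omega
        · simp only [List.length_cons, List.length_nil, Nat.zero_add]
          omega
        · simp only [List.length_cons, List.length_nil, Nat.zero_add, pow_one]
          omega

lemma loopA_exit (number total y x : Int) (h : ¬ total < number) :
    getSnafuLoop number total y x = (total, y, x) := by
  rw [getSnafuLoop, dif_neg h]

lemma loopA_spec : ∀ (f : Nat) (number total y x : Int),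
    (number - total).toNat ≤ f → -1 ≤ x →
    2 * total = 5 ^ ((x + 1).toNat) - 1 → total < number →
    ∃ (m : Nat) (t y' : Int), getSnafuLoop number total y x = (t, y', (m : Int)) ∧
      (y' = 1 ∨ y' = 2) ∧
      2 * (((5:Int) ^ m * y' - number).natAbs : Int) + 1 ≤ 5 ^ m ∧
      (5:Int) ^ m ≤ 2 * number ∧ 2 * number ≤ 5 ^ (m + 1) - 1 := by
  intro f
  induction f with
  | zero =>
      intro number total y x hf hx hinv hlt
      have := pow5_pos ((x + 1).toNat)
      omega
  | succ f ih =>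
      intro number total y x hf hx hinv hlt
      set k : Nat := (x + 1).toNat with hk
      have hxk : x + 1 = (k : Int) := by omega
      have hp := pow5_pos k
      have hop := pow5_odd k
      have hs : (5:Int) ^ (k + 1) = 5 ^ k * 5 := pow_succ 5 k
      rw [getSnafuLoop, dif_pos hlt]
      simp only [hxk, Int.toNat_natCast]
      by_cases hle : number ≤ total + 5 ^ k
      · rw [if_pos hle]
        dsimp only
        rw [loopA_exit _ _ _ _ (by omega)]
        exact ⟨k, total + 5 ^ k, 1, rfl, Or.inl rfl, by omega, by omega, by omega⟩
      · rw [if_neg hle]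
        dsimp only
        by_cases hle2 : number ≤ total + 5 ^ k + 5 ^ k
        · rw [loopA_exit _ _ _ _ (by omega)]
          exact ⟨k, total + 5 ^ k + 5 ^ k, 2, rfl, Or.inr rfl, by omega, by omega, by omega⟩
        · have hinv2 : 2 * (total + 5 ^ k + 5 ^ k) = 5 ^ (((k : Int) + 1).toNat) - 1 := by
            have hkk : (((k : Int)) + 1).toNat = k + 1 := by omega
            rw [hkk, pow_succ]
            omega
          exact ih number _ 2 (k : Int) (by omega) (by omega) hinv2 (by omega)

lemma pow_len_unique (a b : Nat) (t : Int)
    (h1 : (5:Int) ^ a ≤ t) (h2 : t ≤ 5 ^ (a + 1) - 1)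
    (h3 : (5:Int) ^ b ≤ t) (h4 : t ≤ 5 ^ (b + 1) - 1) : a = b := by
  by_contra hne
  rcases Nat.lt_or_ge a b with hab | hab
  · have : (5:Int) ^ (a + 1) ≤ 5 ^ b := pow_le_pow_right₀ (by norm_num) (by omega)
    omega
  · have : (5:Int) ^ (b + 1) ≤ 5 ^ a := pow_le_pow_right₀ (by norm_num) (by omega)
    omega

-- ===== VERDICT (by name: the statement is the Claim_ definition above) =====
theorem get_snafu_spec : Claim_equal_get_snafu := by
  unfold Claim_equal_get_snafu
  intro number snafu _dom
  unfold Spec_get_snafu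
  by_cases hn : 0 < number
  · obtain ⟨m, t, y', hres, hy, hrem, hlo, hhi⟩ :=
      loopA_spec (number - 0).toNat number 0 0 (-1) (le_refl _) (by norm_num) (by norm_num) hn
    obtain ⟨ds, hds, hlen, hgood, hval⟩ :=
      g1_spec m (5 ^ m * y' - number) (snafu ++ [PySem.Int.toStr y']) hrem
    have hA : get_snafu number snafu = snafu ++ (PySem.Int.toStr y' :: ds) := by
      simp only [get_snafu, hres, Int.toNat_natCast]
      rw [hds]
      simp
    obtain ⟨hgB, hlB, hvB, hloB, hhiB⟩ := digitsLE_spec number.toNat number (le_refl _) hn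
    have hDne : snafuDigitsLE number ≠ [] := by
      intro h
      rw [h] at hlB
      simp at hlB
    have hB : get_snafu_alt number snafu = snafu ++ (snafuDigitsLE number).reverse := by
      simp only [get_snafu_alt, if_neg hDne]
    have hdy : dval (PySem.Int.toStr y') = y' := by rcases hy with rfl | rfl <;> decide
    have hgy : PySem.Int.toStr y' = "=" ∨ PySem.Int.toStr y' = "-" ∨ PySem.Int.toStr y' = "0"
        ∨ PySem.Int.toStr y' = "1" ∨ PySem.Int.toStr y' = "2" := by
      rcases hy with rfl | rfl <;> decide
    have hvalA : valBE (PySem.Int.toStr y' :: ds) = number := by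
      rw [valBE_cons, hlen, hval, hdy]
      ring
    have hL1 : (snafuDigitsLE number).length - 1 + 1 = (snafuDigitsLE number).length := by omega
    have hlenEq : m + 1 = (snafuDigitsLE number).length := by
      have := pow_len_unique m ((snafuDigitsLE number).length - 1) (2 * number) hlo hhi hloB
        (by rw [hL1]; exact hhiB)
      omega
    have hEq : PySem.Int.toStr y' :: ds = (snafuDigitsLE number).reverse := by
      apply uniqBE
      · intro s hs
        rcases List.mem_cons.mp hs with rfl | hs
        · exact hgy
        · exact hgood s hs
      · intro s hs
        exact hgB s (List.mem_reverse.mp hs)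
      · rw [List.length_cons, hlen, List.length_reverse]
        omega
      · rw [hvalA, hvB]
    rw [hA, hB, hEq]
  · have hloop : getSnafuLoop number 0 0 (-1) = (0, 0, -1) := loopA_exit _ _ _ _ (by omega)
    have hA : get_snafu number snafu = snafu ++ [PySem.Int.toStr 0] := by
      simp only [get_snafu, hloop]
      rw [get_snafu1, if_pos (by norm_num : ((-1:Int)) - 1 < 0)]
    have hB : get_snafu_alt number snafu = snafu ++ ["0"] := by
      simp only [get_snafu_alt]
      rw [snafuDigitsLE, dif_neg hn]
      simp
    rw [hA, hB]
    have h0 : PySem.Int.toStr 0 = "0" := by decide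
    rw [h0]
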